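-- pv_equiv track=rewrite | github.com/inwaves/advent-of-code | 2022/10/cycles.py | find_signal_strengths
-- ===== SOURCE A (Python) =====
-- from typing import List
-- from enum import IntEnum
--
-- class CycleCosts(IntEnum):
--     NOOP = 1
--     ADDX = 2
--
-- def find_signal_strengths(instructions: List[str], at_indices: List[int]) -> List[int]:
--     cycle = 1
--     register = 1
--     registers_of_interest: List[int] = []
--     for instr in instructions:
--         instr = instr.split(" ")
--         if len(instr) == 1:
--             if cycle in at_indices:
--                 registers_of_interest += [register]
--             cycle += CycleCosts.NOOP
--             continue
--         else:
--             for _ in range(CycleCosts.ADDX):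
--                 if cycle in at_indices:
--                     registers_of_interest += [register]
--                 cycle += 1
--
--             # Adding op finished, write to register.
--             register += int(instr[1])
--
--     if cycle in at_indices:
--         registers_of_interest += [register]
--
--     return registers_of_interest
-- ===== SOURCE B (Python) =====
-- def find_signal_strengths(instructions, at_indices):
--     # Run-length encode the CPU: segments of (length in cycles, register held).
--     segs = []
--     reg = 1
--     for instr in instructions:
--         parts = instr.split(" ")
--         if len(parts) == 1:
--             segs.append((1, reg))
--         else:
--             segs.append((2, reg))
--             reg += int(parts[1])
--     segs.append((1, reg))  # terminal cycle
--     # Merge the sorted distinct queried cycles against the segments (two pointers).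
--     queries = sorted(set(at_indices))
--     out = []
--     i = 0
--     start = 1
--     for length, r in segs:
--         while i < len(queries) and queries[i] < start:
--             i += 1
--         while i < len(queries) and queries[i] < start + length:
--             out.append(r)
--             i += 1
--         start += length
--     return out
-- ===== Notes on version B (the rewrite author's own statement) =====
-- stated objective: faster
-- what changed: Replaced A's cycle-by-cycle simulation with a per-cycle membership scan of at_indices by a run-length encoding of the CPU into (length, register) segments merged two-pointer style against the sorted distinct queried cycles.
import Mathlib
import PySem

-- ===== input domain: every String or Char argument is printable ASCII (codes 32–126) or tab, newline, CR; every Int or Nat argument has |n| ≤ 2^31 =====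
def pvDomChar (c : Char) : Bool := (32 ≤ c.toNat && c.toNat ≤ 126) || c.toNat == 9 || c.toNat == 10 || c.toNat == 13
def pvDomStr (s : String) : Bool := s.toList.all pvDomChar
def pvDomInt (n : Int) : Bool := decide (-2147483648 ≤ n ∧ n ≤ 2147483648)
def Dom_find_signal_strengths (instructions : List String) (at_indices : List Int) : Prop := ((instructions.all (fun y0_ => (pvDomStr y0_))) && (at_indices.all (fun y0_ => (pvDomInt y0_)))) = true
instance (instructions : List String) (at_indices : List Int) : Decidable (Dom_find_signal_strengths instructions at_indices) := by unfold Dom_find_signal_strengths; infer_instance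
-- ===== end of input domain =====

-- B replaces A's cycle-by-cycle simulation (with a membership scan of at_indices at every
-- cycle) by a run-length encoding of the CPU into (length, register) segments, merged
-- two-pointer style against the sorted distinct queried cycles (objective: faster).

-- ===== PORT A =====
-- instr.split(" "): sep " " is nonempty, so PySem.Str.split? is always `some` — .getD [] is exact
-- one step of A's loop over instructions; state = (cycle, register, registers_of_interest)
def fssAStep (at_indices : List Int) (st : Int × Int × List Int) (instr : String) : Int × Int × List Int :=
  let parts := (PySem.Str.split? instr " ").getD []
  let cycle := st.1
  let register := st.2.1
  let acc := st.2.2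
  if parts.length == 1 then
    (cycle + 1, register, if at_indices.contains cycle then acc ++ [register] else acc)
  else
    -- the inner 'for _ in range(2)' loop, unrolled as its two iterations
    let acc1 := if at_indices.contains cycle then acc ++ [register] else acc
    let acc2 := if at_indices.contains (cycle + 1) then acc1 ++ [register] else acc1
    (cycle + 1 + 1, register + (PySem.Int.ofStr? (parts.getD 1 "")).getD 0, acc2)

def find_signal_strengths (instructions : List String) (at_indices : List Int) : List Int :=
  let st := instructions.foldl (fssAStep at_indices) (1, 1, [])
  if at_indices.contains st.1 then st.2.2 ++ [st.2.1] else st.2.2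

-- ===== PORT B =====
-- pass 1: run-length encoding; state = (reg, segs)
def fssSegStep (st : Int × List (Int × Int)) (instr : String) : Int × List (Int × Int) :=
  let parts := (PySem.Str.split? instr " ").getD []
  if parts.length == 1 then (st.1, st.2 ++ [(1, st.1)])
  else (st.1 + (PySem.Int.ofStr? (parts.getD 1 "")).getD 0, st.2 ++ [(2, st.1)])

-- 'while i < len(queries) and queries[i] < start: i += 1', on the remaining queries
def fssSkipLt (c : Int) : List Int → List Int
  | [] => []
  | q :: qs => if q < c then fssSkipLt c qs else q :: qs

-- 'while i < len(queries) and queries[i] < start + length: out.append(r); i += 1'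
def fssTakeLt (r c : Int) : List Int → List Int × List Int
  | [] => ([], [])
  | q :: qs =>
    if q < c then
      let p := fssTakeLt r c qs
      (r :: p.1, p.2)
    else ([], q :: qs)

-- one iteration of the 'for length, r in segs' loop; state = (remaining queries, start, out)
def fssMergeStep (st : List Int × Int × List Int) (seg : Int × Int) : List Int × Int × List Int :=
  let qs := fssSkipLt st.2.1 st.1
  let p := fssTakeLt seg.2 (st.2.1 + seg.1) qs
  (p.2, st.2.1 + seg.1, st.2.2 ++ p.1)

def find_signal_strengths_alt (instructions : List String) (at_indices : List Int) : List Int :=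
  let st := instructions.foldl fssSegStep (1, [])
  let segs := st.2 ++ [(1, st.1)]
  let queries := PySem.List.sorted (PySem.Set.ofList at_indices) (fun x => x) false
  (segs.foldl fssMergeStep (queries, 1, [])).2.2

-- ===== PRECONDITION & SPEC =====
-- Pre_ excludes exactly the inputs where Python A raises ValueError: an instruction that
-- splits into several parts whose second part is not accepted by int().
def Pre_find_signal_strengths (instructions : List String) (at_indices : List Int) : Prop :=
  ∀ s ∈ instructions, ((PySem.Str.split? s " ").getD []).length = 1 ∨
    (PySem.Int.ofStr? (((PySem.Str.split? s " ").getD []).getD 1 "")) ≠ none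
instance (instructions : List String) (at_indices : List Int) : Decidable (Pre_find_signal_strengths instructions at_indices) := by unfold Pre_find_signal_strengths; infer_instance
def pvWitness_find_signal_strengths : List String × List Int := (["noop", "addx 3", "noop"], [1, 3, 5])
def Spec_find_signal_strengths (instructions : List String) (at_indices : List Int) (out : List Int) : Prop := out = find_signal_strengths_alt instructions at_indices
instance (instructions : List String) (at_indices : List Int) (out : List Int) : Decidable (Spec_find_signal_strengths instructions at_indices out) := by unfold Spec_find_signal_strengths; infer_instance

-- ===== CLAIM (what is proved, stated in full; the proofs are below) =====
def Claim_equal_find_signal_strengths : Prop := ∀ (instructions : List String) (at_indices : List Int), Dom_find_signal_strengths instructions at_indices → Pre_find_signal_strengths instructions at_indices → Spec_find_signal_strengths instructions at_indices (find_signal_strengths instructions at_indices)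

-- ===== LEMMAS AND PROOFS =====

-- the per-cycle register timeline (including the terminal cycle)
def fssTL : List String → Int → List Int
  | [], r => [r]
  | i :: is, r =>
    let parts := (PySem.Str.split? i " ").getD []
    if parts.length == 1 then r :: fssTL is r
    else r :: r :: fssTL is (r + (PySem.Int.ofStr? (parts.getD 1 "")).getD 0)

-- collect timeline values whose cycle number (starting at c) is in ats
def fssCollect (ats : List Int) (c : Int) : List Int → List Int
  | [] => []
  | x :: xs => (if ats.contains c then [x] else []) ++ fssCollect ats (c + 1) xs

-- the run-length segments of the instruction stream (terminal segment not included)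
def fssSegsOf : List String → Int → List (Int × Int)
  | [], _ => []
  | i :: is, r =>
    let parts := (PySem.Str.split? i " ").getD []
    if parts.length == 1 then (1, r) :: fssSegsOf is r
    else (2, r) :: fssSegsOf is (r + (PySem.Int.ofStr? (parts.getD 1 "")).getD 0)

def fssFin : List String → Int → Int
  | [], r => r
  | i :: is, r =>
    let parts := (PySem.Str.split? i " ").getD []
    if parts.length == 1 then fssFin is r
    else fssFin is (r + (PySem.Int.ofStr? (parts.getD 1 "")).getD 0)

def fssTLofSegs (segs : List (Int × Int)) : List Int :=
  segs.flatMap (fun p => List.replicate p.1.toNat p.2)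

-- === A-side characterisation ===
theorem fssA_eq_collect (ats : List Int) (instrs : List String) (c r : Int) (acc : List Int) :
    (let st := instrs.foldl (fssAStep ats) (c, r, acc)
     if ats.contains st.1 then st.2.2 ++ [st.2.1] else st.2.2) =
    acc ++ fssCollect ats c (fssTL instrs r) := by
  induction instrs generalizing c r acc with
  | nil => simp only [List.foldl_nil, fssTL, fssCollect]; split <;> simp
  | cons i is ih =>
    simp only [List.foldl_cons, fssTL]
    by_cases h : ((((PySem.Str.split? i " ").getD []).length == 1) = true)
    · simp only [fssAStep, h, if_true]
      rw [ih]
      simp only [fssCollect]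
      split <;> simp
    · simp only [fssAStep, h, Bool.false_eq_true, if_false]
      rw [ih]
      simp only [fssCollect]
      split <;> split <;> simp

-- fssCollect only looks at membership
theorem fssCollect_congr (a b : List Int) (h : ∀ x, a.contains x = b.contains x)
    (tl : List Int) (c : Int) : fssCollect a c tl = fssCollect b c tl := by
  induction tl generalizing c with
  | nil => rfl
  | cons x xs ih => simp only [fssCollect, h, ih]

-- === skip/take basic facts ===
theorem fssSkipLt_skipLt (c c' : Int) (h : c ≤ c') (qs : List Int) :
    fssSkipLt c' (fssSkipLt c qs) = fssSkipLt c' qs := by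
  induction qs with
  | nil => rfl
  | cons q qs ih =>
    by_cases hq : q < c
    · simp only [fssSkipLt, if_pos hq, ih, if_pos (lt_of_lt_of_le hq h)]
    · simp only [fssSkipLt, if_neg hq]

theorem fssSkipLt_suffix (c : Int) (qs : List Int) : fssSkipLt c qs <:+ qs := by
  induction qs with
  | nil => exact List.suffix_rfl
  | cons q qs ih =>
    by_cases hq : q < c
    · simp only [fssSkipLt, if_pos hq]; exact ih.trans (List.suffix_cons q qs)
    · simp only [fssSkipLt, if_neg hq]; exact List.suffix_rfl

theorem fssSkipLt_eq_nil (c : Int) (qs : List Int) (h : fssSkipLt c qs = []) :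
    ∀ x ∈ qs, x < c := by
  induction qs with
  | nil => intro x hx; cases hx
  | cons q qs ih =>
    intro x hx
    by_cases hq : q < c
    · simp only [fssSkipLt, if_pos hq] at h
      rcases List.mem_cons.1 hx with rfl | hx
      · exact hq
      · exact ih h x hx
    · simp only [fssSkipLt, if_neg hq] at h; cases h

theorem fssSkipLt_id (c : Int) (qs : List Int) (h : ∀ x ∈ qs, c ≤ x) :
    fssSkipLt c qs = qs := by
  cases qs with
  | nil => rfl
  | cons q qs =>
    have : ¬ q < c := not_lt.2 (h q (List.mem_cons_self))
    simp only [fssSkipLt, if_neg this]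

theorem mem_fssSkipLt (c : Int) (qs : List Int) (x : Int) (hx : x ∈ qs) (hge : c ≤ x) :
    x ∈ fssSkipLt c qs := by
  induction qs with
  | nil => cases hx
  | cons q qs ih =>
    by_cases hq : q < c
    · simp only [fssSkipLt, if_pos hq]
      rcases List.mem_cons.1 hx with rfl | hx
      · omega
      · exact ih hx
    · simpa only [fssSkipLt, if_neg hq] using hx

theorem fssTakeLt_skip_self (r c : Int) (qs : List Int) :
    fssTakeLt r c (fssSkipLt c qs) = ([], fssSkipLt c qs) := by
  induction qs with
  | nil => rfl
  | cons q qs ih =>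
    by_cases hq : q < c
    · simp only [fssSkipLt, if_pos hq, ih]
    · simp only [fssSkipLt, fssTakeLt, if_neg hq]

theorem fssCollect_nil_of_all_lt (S : List Int) (c : Int) (tl : List Int)
    (h : ∀ x ∈ S, x < c) : fssCollect S c tl = [] := by
  induction tl generalizing c with
  | nil => rfl
  | cons x xs ih =>
    have hc : S.contains c = false := by
      simpa using fun hcS => absurd (h c hcS) (lt_irrefl c)
    simp only [fssCollect, hc, Bool.false_eq_true, if_false, List.nil_append]
    exact ih (c + 1) (fun x hx => lt_trans (h x hx) (by omega))

theorem fssCollect_append (S : List Int) (c : Int) (t1 t2 : List Int) :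
    fssCollect S c (t1 ++ t2) = fssCollect S c t1 ++ fssCollect S (c + t1.length) t2 := by
  induction t1 generalizing c with
  | nil => simp [fssCollect]
  | cons x xs ih =>
    simp only [List.cons_append, fssCollect, ih, List.length_cons]
    have : c + 1 + (xs.length : Int) = c + ((xs.length : Int) + 1) := by ring
    rw [this]
    simp [List.append_assoc]

-- === the single-segment lemma ===
theorem fssSkipLt_nil_of_all_lt (c : Int) (qs : List Int) (h : ∀ x ∈ qs, x < c) :
    fssSkipLt c qs = [] := by
  induction qs with
  | nil => rfl
  | cons q qs ih =>
    simp only [fssSkipLt, if_pos (h q List.mem_cons_self)]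
    exact ih (fun x hx => h x (List.mem_cons_of_mem q hx))

theorem fssSkipLt_head_ge (c q : Int) (l t : List Int) (h : fssSkipLt c l = q :: t) :
    c ≤ q := by
  induction l with
  | nil => cases h
  | cons a as ih =>
    by_cases ha : a < c
    · simp only [fssSkipLt, if_pos ha] at h; exact ih h
    · simp only [fssSkipLt, if_neg ha] at h
      cases h; omega

theorem fssSeg (S : List Int) (hS : S.Pairwise (· < ·)) (r : Int) :
    ∀ (l : Nat) (c : Int),
      fssTakeLt r (c + (l : Int)) (fssSkipLt c S) =
        (fssCollect S c (List.replicate l r), fssSkipLt (c + (l : Int)) S) := by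
  intro l
  induction l with
  | zero =>
    intro c
    simpa using fssTakeLt_skip_self r c S
  | succ l ih =>
    intro c
    cases hsk : fssSkipLt c S with
    | nil =>
      have hall : ∀ x ∈ S, x < c := fssSkipLt_eq_nil c S hsk
      have h2 : fssSkipLt (c + ((l + 1 : Nat) : Int)) S = [] :=
        fssSkipLt_nil_of_all_lt _ S (fun x hx => by have := hall x hx; push_cast; omega)
      rw [h2, fssCollect_nil_of_all_lt S c _ hall]
      rfl
    | cons q qs =>
      have hsuf : q :: qs <:+ S := hsk ▸ fssSkipLt_suffix c S
      have hqS : q ∈ S := hsuf.subset List.mem_cons_self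
      have hqc : c ≤ q := fssSkipLt_head_ge c q S qs hsk
      have hpair : (q :: qs).Pairwise (· < ·) := List.Pairwise.sublist hsuf.sublist hS
      have hqs_gt : ∀ x ∈ qs, q < x := fun x hx => (List.pairwise_cons.1 hpair).1 x hx
      by_cases hqeq : q = c
      · subst hqeq
        have hmem : S.contains q = true := by simpa using hqS
        have hqs_eq : fssSkipLt (q + 1) S = qs := by
          rw [← fssSkipLt_skipLt q (q + 1) (by omega) S, hsk]
          simp only [fssSkipLt, if_pos (by omega : q < q + 1)]
          exact fssSkipLt_id (q + 1) qs (fun x hx => by have := hqs_gt x hx; omega)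
        have hlt : q < q + ((l + 1 : Nat) : Int) := by push_cast; omega
        have harith : q + ((l + 1 : Nat) : Int) = (q + 1) + (l : Int) := by push_cast; ring
        simp only [fssTakeLt, if_pos hlt]
        rw [show qs = fssSkipLt (q + 1) S from hqs_eq.symm, harith, ih (q + 1)]
        simp only [List.replicate, fssCollect, hmem]
        rfl
      · have hqgt : c < q := lt_of_le_of_ne hqc (Ne.symm hqeq)
        have hcnot : c ∉ S := by
          intro hcS
          have : c ∈ q :: qs := hsk ▸ mem_fssSkipLt c S c hcS le_rfl
          rcases List.mem_cons.1 this with h' | h'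
          · omega
          · have := hqs_gt c h'; omega
        have hnotmem : S.contains c = false := by simpa using hcnot
        have hskip1 : fssSkipLt (c + 1) S = q :: qs := by
          rw [← fssSkipLt_skipLt c (c + 1) (by omega) S, hsk]
          exact fssSkipLt_id (c + 1) (q :: qs) (by
            intro x hx
            rcases List.mem_cons.1 hx with rfl | hx
            · omega
            · have := hqs_gt x hx; omega)
        have harith : c + ((l + 1 : Nat) : Int) = (c + 1) + (l : Int) := by push_cast; ring
        rw [show q :: qs = fssSkipLt (c + 1) S from hskip1.symm, harith, ih (c + 1)]
        simp only [List.replicate, fssCollect, hnotmem, Bool.false_eq_true, if_false,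
          List.nil_append]

-- total length of a segment list
def fssTot (segs : List (Int × Int)) : Int := (segs.map Prod.fst).sum

-- === the merge fold ===
theorem fssMerge (S : List Int) (hS : S.Pairwise (· < ·)) :
    ∀ (segs : List (Int × Int)) (qs : List Int) (c : Int) (out : List Int),
      (∀ p ∈ segs, 0 ≤ p.1) →
      fssSkipLt c qs = fssSkipLt c S →
      (segs.foldl fssMergeStep (qs, c, out)).2.2 = out ++ fssCollect S c (fssTLofSegs segs) ∧
      (segs.foldl fssMergeStep (qs, c, out)).2.1 = c + fssTot segs ∧
      fssSkipLt (c + fssTot segs) (segs.foldl fssMergeStep (qs, c, out)).1 =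
        fssSkipLt (c + fssTot segs) S := by
  intro segs
  induction segs with
  | nil =>
    intro qs c out _ hqs
    refine ⟨by simp [fssTLofSegs, fssCollect], by simp [fssTot], ?_⟩
    simpa [fssTot] using hqs
  | cons seg ss ih =>
    intro qs c out hnn hqs
    obtain ⟨l, r⟩ := seg
    have hl : 0 ≤ l := hnn (l, r) List.mem_cons_self
    have hcast : ((l.toNat : Nat) : Int) = l := Int.toNat_of_nonneg hl
    have hseg := fssSeg S hS r l.toNat c
    rw [hcast] at hseg
    simp only [List.foldl_cons, fssMergeStep, hqs, hseg]
    have htl : fssTLofSegs ((l, r) :: ss) =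
        List.replicate l.toNat r ++ fssTLofSegs ss := by
      simp [fssTLofSegs]
    have hlen : ((List.replicate l.toNat r).length : Int) = l := by
      simp [hcast]
    have hnext := ih (fssSkipLt (c + l) S) (c + l) (out ++ fssCollect S c (List.replicate l.toNat r))
      (fun p hp => hnn p (List.mem_cons_of_mem _ hp))
      (fssSkipLt_skipLt (c + l) (c + l) le_rfl S)
    refine ⟨?_, ?_, ?_⟩
    · rw [hnext.1, htl, fssCollect_append, hlen, List.append_assoc]
    · rw [hnext.2.1, fssTot, fssTot]; simp; ring
    · have harith : c + l + fssTot ss = c + fssTot ((l, r) :: ss) := by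
        simp [fssTot]; ring
      rw [← harith]
      exact hnext.2.2

-- === segments fold & timeline relation ===
theorem fssSegFold (instrs : List String) (r : Int) (acc : List (Int × Int)) :
    instrs.foldl fssSegStep (r, acc) = (fssFin instrs r, acc ++ fssSegsOf instrs r) := by
  induction instrs generalizing r acc with
  | nil => simp [fssFin, fssSegsOf]
  | cons i is ih =>
    simp only [List.foldl_cons, fssSegStep, fssFin, fssSegsOf]
    by_cases h : ((((PySem.Str.split? i " ").getD []).length == 1) = true)
    · simp only [h, if_true, ih]; simp
    · simp only [h, Bool.false_eq_true, if_false, ih]; simp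

theorem fssSegsOf_nonneg (instrs : List String) (r : Int) :
    ∀ p ∈ fssSegsOf instrs r ++ [(1, fssFin instrs r)], 0 ≤ p.1 := by
  induction instrs generalizing r with
  | nil => intro p hp; simp [fssSegsOf] at hp; subst hp; norm_num
  | cons i is ih =>
    intro p hp
    simp only [fssSegsOf, fssFin] at hp ⊢
    by_cases h : ((((PySem.Str.split? i " ").getD []).length == 1) = true)
    · simp only [h, if_true] at hp
      rcases List.mem_cons.1 hp with rfl | hp
      · norm_num
      · exact ih r p hp
    · simp only [h, Bool.false_eq_true, if_false] at hp
      rcases List.mem_cons.1 hp with rfl | hp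
      · norm_num
      · exact ih _ p hp

theorem fssTL_eq_segs (instrs : List String) (r : Int) :
    fssTL instrs r = fssTLofSegs (fssSegsOf instrs r ++ [(1, fssFin instrs r)]) := by
  induction instrs generalizing r with
  | nil => simp [fssTL, fssSegsOf, fssFin, fssTLofSegs]
  | cons i is ih =>
    simp only [fssTL, fssSegsOf, fssFin]
    by_cases h : ((((PySem.Str.split? i " ").getD []).length == 1) = true)
    · simp only [h, if_true, ih]
      simp [fssTLofSegs]
    · simp only [h, Bool.false_eq_true, if_false, ih]
      simp [fssTLofSegs, List.replicate]

-- ===== VERDICT (by name: the statement is the Claim_ definition above) =====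
theorem find_signal_strengths_spec : Claim_equal_find_signal_strengths := by
  intro instructions at_indices _ _
  unfold Spec_find_signal_strengths find_signal_strengths find_signal_strengths_alt
  rw [fssA_eq_collect]
  set S := PySem.List.sorted (PySem.Set.ofList at_indices) (fun x => x) false with hSdef
  have hpair : S.Pairwise (· < ·) := PySem.List.sorted_ofList_pairwise_lt at_indices
  have hmem : ∀ x, at_indices.contains x = S.contains x := by
    intro x
    have : x ∈ S ↔ x ∈ at_indices := by
      rw [hSdef, PySem.List.mem_sorted, PySem.Set.mem_ofList]
    rcases Bool.eq_false_or_eq_true (at_indices.contains x) with h | h <;>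
      rcases Bool.eq_false_or_eq_true (S.contains x) with h' | h' <;>
        simp_all
  rw [fssCollect_congr at_indices S hmem]
  rw [fssSegFold instructions 1 []]
  simp only [List.nil_append]
  have := fssMerge S hpair (fssSegsOf instructions 1 ++ [(1, fssFin instructions 1)]) S 1 []
    (fssSegsOf_nonneg instructions 1) rfl
  rw [this.1, fssTL_eq_segs, List.nil_append]
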